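-- pv_equiv track=rewrite | github.com/textext/textext | textext/base.py | _contains_document_class
-- ===== SOURCE A (Python) =====
-- def _contains_document_class(preamble):
--     """Return True if `preamble` contains a documentclass-like command.
--
--     Also, checks and considers if the command is commented out or not.
--     """
--     lines = preamble.split("\n")
--     document_commands = ["\\documentclass{", "\\documentclass[",
--                         "\\documentstyle{", "\\documentstyle["]
--     for line in lines:
--         for document_command in document_commands:
--             if (document_command in line
--                 and "%" not in line.split(document_command)[0]):
--                 return True
--     return False
-- ===== SOURCE B (Python) =====
-- def _contains_document_class(preamble):
--     """Return True if `preamble` contains a documentclass-like command.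
--
--     Single left-to-right scan with a 'commented' flag instead of
--     splitting into lines and sub-splitting per command.
--     """
--     commands = ("\\documentclass{", "\\documentclass[",
--                 "\\documentstyle{", "\\documentstyle[")
--     commented = False
--     for i, ch in enumerate(preamble):
--         if ch == "\n":
--             commented = False
--         elif ch == "%":
--             commented = True
--         elif not commented and preamble.startswith(commands, i):
--             return True
--     return False
-- ===== Notes on version B (the rewrite author's own statement) =====
-- stated objective: simpler
-- what changed: Replaced A's split-into-lines plus nested per-command substring/split checks by a single left-to-right scan that keeps an in-comment flag (reset at newline, set at the percent sign) and tests startswith at each position outside comments.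
import Mathlib
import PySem

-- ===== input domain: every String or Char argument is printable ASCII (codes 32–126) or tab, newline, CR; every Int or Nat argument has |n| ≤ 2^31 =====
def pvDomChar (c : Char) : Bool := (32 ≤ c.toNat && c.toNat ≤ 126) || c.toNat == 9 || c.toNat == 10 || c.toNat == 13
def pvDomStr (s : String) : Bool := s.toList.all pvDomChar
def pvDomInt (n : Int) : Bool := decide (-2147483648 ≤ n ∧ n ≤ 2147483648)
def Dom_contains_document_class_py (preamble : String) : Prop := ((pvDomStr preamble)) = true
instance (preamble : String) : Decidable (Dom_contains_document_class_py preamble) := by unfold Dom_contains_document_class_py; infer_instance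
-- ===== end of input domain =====

-- B replaces A's split-into-lines + per-command substring/split checks by a single
-- left-to-right scan with a 'commented' flag (objective: alternative/simpler traversal).

-- ===== PORT A =====
-- the four document commands, as in A
def pvCmds : List (List Char) :=
  ["\\documentclass{".toList, "\\documentclass[".toList,
   "\\documentstyle{".toList, "\\documentstyle[".toList]

def contains_document_class_py (preamble : String) : Bool :=
  let lines := PySem.Chars.splitOn preamble.toList ['\n']
  lines.any (fun line =>
    pvCmds.any (fun cmd =>
      PySem.Chars.isIn cmd line &&
        !(PySem.Chars.isIn ['%'] (PySem.List.pyGetD (PySem.Chars.splitOn line cmd) 0 []))))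

-- ===== PORT B =====
-- preamble.startswith(commands, i), on the suffix at i
def pvStartsCmd (s : List Char) : Bool := pvCmds.any (fun cmd => PySem.Chars.startswith s cmd)

def pvScan : Bool → List Char → Bool
  | _, [] => false
  | commented, c :: rest =>
    if c = '\n' then pvScan false rest
    else if c = '%' then pvScan true rest
    else if !commented && pvStartsCmd (c :: rest) then true
    else pvScan commented rest

def contains_document_class_py_alt (preamble : String) : Bool :=
  pvScan false preamble.toList

-- ===== PRECONDITION & SPEC =====
def Spec_contains_document_class_py (preamble : String) (out : Bool) : Prop := out = contains_document_class_py_alt preamble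
instance (preamble : String) (out : Bool) : Decidable (Spec_contains_document_class_py preamble out) := by unfold Spec_contains_document_class_py; infer_instance

-- ===== CLAIM (what is proved, stated in full; the proofs are below) =====
def Claim_equal_contains_document_class_py : Prop := ∀ (preamble : String), Dom_contains_document_class_py preamble → Spec_contains_document_class_py preamble (contains_document_class_py preamble)

-- ===== LEMMAS AND PROOFS =====

-- the prefix of l before the first occurrence of sep (what Python's l.split(sep)[0] is)
def pvTakeUntil (sep : List Char) : List Char → List Char
  | [] => []
  | c :: rest => if sep.isPrefixOf (c :: rest) then [] else c :: pvTakeUntil sep rest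

-- structural (fuel-free) version of splitting on a newline
def pvSplitNL : List Char → List Char → List (List Char) → List (List Char)
  | [], cur, acc => (cur.reverse :: acc).reverse
  | c :: rest, cur, acc =>
    if c = '\n' then pvSplitNL rest [] (cur.reverse :: acc)
    else pvSplitNL rest (c :: cur) acc

-- A's per-line, per-command test (the body of A's nested loops)
def pvCheckLine (line : List Char) : Bool :=
  pvCmds.any (fun cmd =>
    PySem.Chars.isIn cmd line &&
      !(PySem.Chars.isIn ['%'] (PySem.List.pyGetD (PySem.Chars.splitOn line cmd) 0 [])))

-- facts about the four commands
theorem pvCmds_no_nl : ∀ cmd ∈ pvCmds, '\n' ∉ cmd := by decide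
theorem pvCmds_ne_nil : ∀ cmd ∈ pvCmds, cmd ≠ [] := by decide

-- splitOn.go's accumulator only prepends finished pieces
theorem pvGo_acc (sep : List Char) (fuel : Nat) (l cur : List Char) (acc : List (List Char)) :
    PySem.Chars.splitOn.go sep fuel l cur acc = acc.reverse ++ PySem.Chars.splitOn.go sep fuel l cur [] := by
  induction fuel generalizing l cur acc with
  | zero => simp [PySem.Chars.splitOn.go]
  | succ f ih =>
    match l with
    | [] => simp [PySem.Chars.splitOn.go]
    | c :: rest =>
      rw [PySem.Chars.splitOn.go, PySem.Chars.splitOn.go]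
      by_cases hp : sep.isPrefixOf (c :: rest)
      · simp only [if_pos hp]
        rw [ih _ _ (cur.reverse :: acc), ih _ _ ([cur.reverse])]
        simp
      · simp only [if_neg hp]
        exact ih _ _ _

-- with enough fuel, the head of splitOn.go is cur.reverse ++ (prefix before the first sep)
theorem pvGo_head (sep : List Char) (fuel : Nat) (l cur : List Char)
    (hf : l.length < fuel) :
    (PySem.Chars.splitOn.go sep fuel l cur []).head? = some (cur.reverse ++ pvTakeUntil sep l) := by
  induction l generalizing fuel cur with
  | nil =>
    match fuel, hf with
    | f + 1, _ => simp [PySem.Chars.splitOn.go, pvTakeUntil]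
  | cons c rest ih =>
    match fuel, hf with
    | f + 1, hf =>
      rw [PySem.Chars.splitOn.go]
      by_cases hp : sep.isPrefixOf (c :: rest)
      · simp only [if_pos hp]
        rw [pvGo_acc]
        simp [pvTakeUntil, hp]
      · simp only [if_neg hp]
        rw [ih f _ (by simpa using hf)]
        simp [pvTakeUntil, hp]

-- Python's line.split(sep)[0] is the prefix before the first occurrence of sep
theorem pvSplitOn_head (sep l : List Char) :
    PySem.List.pyGetD (PySem.Chars.splitOn l sep) 0 [] = pvTakeUntil sep l := by
  have h := pvGo_head sep (l.length + 1) l [] (by omega)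
  unfold PySem.Chars.splitOn
  rw [PySem.List.pyGetD_zero]
  cases hgo : PySem.Chars.splitOn.go sep (l.length + 1) l [] [] with
  | nil => rw [hgo] at h; simp at h
  | cons x xs => rw [hgo] at h; simp at h; simp [h]

-- with enough fuel, splitOn.go on '\n' is the structural pvSplitNL
theorem pvGo_eq_splitNL (fuel : Nat) (l cur : List Char) (acc : List (List Char))
    (hf : l.length < fuel) :
    PySem.Chars.splitOn.go ['\n'] fuel l cur acc = pvSplitNL l cur acc := by
  induction l generalizing fuel cur acc with
  | nil =>
    match fuel, hf with
    | f + 1, _ => simp [PySem.Chars.splitOn.go, pvSplitNL]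
  | cons c rest ih =>
    match fuel, hf with
    | f + 1, hf =>
      rw [PySem.Chars.splitOn.go, pvSplitNL]
      by_cases hc : c = '\n'
      · subst hc
        have hpre : (['\n'] : List Char).isPrefixOf ('\n' :: rest) = true := by
          simp [List.isPrefixOf]
        simp only [hpre, List.length_cons]
        exact ih f [] _ (by simpa using hf)
      · have hpre : (['\n'] : List Char).isPrefixOf (c :: rest) = false := by
          simp [List.isPrefixOf]; exact fun hh => hc hh.symm
        simp only [hpre, if_neg hc, Bool.false_eq_true, if_false]
        exact ih f _ _ (by simpa using hf)

theorem pvSplitNL_acc (l cur : List Char) (acc : List (List Char)) :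
    pvSplitNL l cur acc = acc.reverse ++ pvSplitNL l cur [] := by
  induction l generalizing cur acc with
  | nil => simp [pvSplitNL]
  | cons c rest ih =>
    by_cases hc : c = '\n'
    · simp only [pvSplitNL, if_pos hc]
      rw [ih, ih [] ([cur.reverse])]
      simp
    · simp only [pvSplitNL, if_neg hc]
      exact ih _ _

theorem pvSplitNL_no_nl (l cur : List Char) (h : '\n' ∉ l) :
    pvSplitNL l cur [] = [cur.reverse ++ l] := by
  induction l generalizing cur with
  | nil => simp [pvSplitNL]
  | cons c rest ih =>
    simp at h
    rw [pvSplitNL, if_neg (fun hh => h.1 hh.symm), ih _ h.2]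
    simp

theorem pvSplitNL_cons (l r cur : List Char) (h : '\n' ∉ l) :
    pvSplitNL (l ++ '\n' :: r) cur [] = (cur.reverse ++ l) :: pvSplitNL r [] [] := by
  induction l generalizing cur with
  | nil =>
    simp only [List.nil_append, pvSplitNL]
    rw [pvSplitNL_acc]
    simp
  | cons c rest ih =>
    simp at h
    rw [List.cons_append, pvSplitNL, if_neg (fun hh => h.1 hh.symm), ih _ h.2]
    simp

-- prefixes reaching past a newline cannot match a newline-free pattern
theorem pvPrefix_append_nl (cmd l r : List Char) (hc : '\n' ∉ cmd) (hl : '\n' ∉ l) :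
    cmd.isPrefixOf (l ++ '\n' :: r) = cmd.isPrefixOf l := by
  induction cmd generalizing l with
  | nil => simp [List.isPrefixOf]
  | cons d cmd' ih =>
    simp at hc
    match l with
    | [] =>
      simp [List.isPrefixOf]
      exact fun hh => absurd hh.symm hc.1
    | c :: l' =>
      simp at hl
      simp only [List.cons_append, List.isPrefixOf]
      rw [ih l' hc.2 hl.2]

-- isIn as an existential over drop positions
theorem pvIsIn_iff (sub s : List Char) :
    PySem.Chars.isIn sub s = true ↔ ∃ j, sub.isPrefixOf (s.drop j) = true := by
  rw [← PySem.Chars.exists_prefix_drop_iff_isIn]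
  simp [List.isPrefixOf_iff_prefix]

-- A's condition for one command, characterised positionally
theorem pvCmd_iff (cmd l : List Char) (hcne : cmd ≠ []) :
    (PySem.Chars.isIn cmd l &&
       !(PySem.Chars.isIn ['%'] (pvTakeUntil cmd l))) = true ↔
      ∃ j, '%' ∉ l.take j ∧ cmd.isPrefixOf (l.drop j) = true := by
  induction l with
  | nil =>
    simp only [Bool.and_eq_true, pvIsIn_iff]
    constructor
    · rintro ⟨⟨j, hj⟩, _⟩
      simp [List.isPrefixOf_iff_prefix] at hj
      exact absurd hj hcne
    · rintro ⟨j, _, hj⟩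
      simp [List.isPrefixOf_iff_prefix] at hj
      exact absurd hj hcne
  | cons c rest ih =>
    by_cases hp : cmd.isPrefixOf (c :: rest) = true
    · have h1 : PySem.Chars.isIn cmd (c :: rest) = true := by
        rw [pvIsIn_iff]; exact ⟨0, by simpa using hp⟩
      have h2 : pvTakeUntil cmd (c :: rest) = [] := by rw [pvTakeUntil, if_pos hp]
      rw [h1, h2]
      have h3 : PySem.Chars.isIn ['%'] ([] : List Char) = false := by decide
      rw [h3]
      constructor
      · intro _; exact ⟨0, by simp, by simpa using hp⟩
      · intro _; decide
    · have h2 : pvTakeUntil cmd (c :: rest) = c :: pvTakeUntil cmd rest := by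
        rw [pvTakeUntil, if_neg (by simpa using hp)]
      rw [h2]
      have hIn : PySem.Chars.isIn cmd (c :: rest) = PySem.Chars.isIn cmd rest := by
        by_cases h : PySem.Chars.isIn cmd rest = true
        · rw [h, pvIsIn_iff]
          rcases (pvIsIn_iff cmd rest).1 h with ⟨j, hj⟩
          exact ⟨j + 1, by simpa using hj⟩
        · have h' : PySem.Chars.isIn cmd (c :: rest) = false := by
            rw [Bool.eq_false_iff]
            intro hcon
            rcases (pvIsIn_iff cmd (c :: rest)).1 hcon with ⟨j, hj⟩
            match j with
            | 0 => exact hp (by simpa using hj)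
            | j + 1 => exact h ((pvIsIn_iff cmd rest).2 ⟨j, by simpa using hj⟩)
          rw [h', Bool.eq_false_iff.2 h]
      have hPct : PySem.Chars.isIn ['%'] (c :: pvTakeUntil cmd rest) = true ↔
          ('%' = c ∨ PySem.Chars.isIn ['%'] (pvTakeUntil cmd rest) = true) := by
        rw [PySem.Chars.isIn_iff_infix, PySem.Chars.isIn_iff_infix,
            List.singleton_infix_iff, List.singleton_infix_iff]
        simp
      by_cases hcp : c = '%'
      · subst hcp
        have hfalse : (PySem.Chars.isIn cmd ('%' :: rest) &&
            !(PySem.Chars.isIn ['%'] ('%' :: pvTakeUntil cmd rest))) = false := by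
          have ht : PySem.Chars.isIn ['%'] ('%' :: pvTakeUntil cmd rest) = true :=
            hPct.2 (Or.inl rfl)
          simp [ht]
        rw [hfalse]
        simp only [Bool.false_eq_true, false_iff, not_exists, not_and]
        intro j hj1
        match j with
        | 0 =>
          intro hj2
          exact hp (by simpa using hj2)
        | j + 1 => exact absurd (by simp) hj1
      · rw [Bool.and_eq_true, hIn]
        constructor
        · rintro ⟨hi, hno⟩
          have : PySem.Chars.isIn ['%'] (pvTakeUntil cmd rest) = false := by
            rw [Bool.eq_false_iff]; intro hcon
            simp [hPct.2 (Or.inr hcon)] at hno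
          rcases ih.1 (by simp [hi, this]) with ⟨j, hj1, hj2⟩
          exact ⟨j + 1, by simp [hj1]; exact fun hh => hcp hh.symm, by simpa using hj2⟩
        · rintro ⟨j, hj1, hj2⟩
          have hrest : ∃ j, '%' ∉ rest.take j ∧ cmd.isPrefixOf (rest.drop j) = true := by
            match j with
            | 0 => exact absurd (by simpa using hj2) hp
            | j + 1 =>
              refine ⟨j, ?_, by simpa using hj2⟩
              simp at hj1; exact hj1.2
          have := ih.2 hrest
          rw [Bool.and_eq_true] at this
          refine ⟨this.1, ?_⟩
          rcases this with ⟨_, hno⟩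
          simp only [Bool.not_eq_eq_eq_not, Bool.not_true] at hno ⊢
          rw [Bool.eq_false_iff]
          intro hcon
          rcases hPct.1 hcon with h | h
          · exact hcp h.symm
          · rw [h] at hno; simp at hno

-- once commented, a newline-free suffix never fires
theorem pvScan_true (l : List Char) (h : '\n' ∉ l) : pvScan true l = false := by
  induction l with
  | nil => rfl
  | cons c rest ih =>
    simp at h
    rw [pvScan, if_neg (fun hh => h.1 hh.symm)]
    by_cases hp : c = '%' <;> simp [hp, ih h.2]

-- B on a single line, characterised positionally
theorem pvScan_line (l : List Char) (h : '\n' ∉ l) :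
    pvScan false l = true ↔ ∃ j, '%' ∉ l.take j ∧ pvStartsCmd (l.drop j) = true := by
  induction l with
  | nil =>
    simp only [pvScan, Bool.false_eq_true, false_iff, not_exists, not_and]
    intro j _
    simp [pvStartsCmd, pvCmds, PySem.Chars.startswith, List.isPrefixOf]
  | cons c rest ih =>
    simp at h
    rw [pvScan, if_neg (fun hh => h.1 hh.symm)]
    by_cases hp : c = '%'
    · subst hp
      rw [if_pos rfl, pvScan_true rest h.2]
      simp only [Bool.false_eq_true, false_iff, not_exists, not_and]
      intro j hj1
      match j with
      | 0 =>
        -- startsCmd ('%'::rest) is false: commands start with '\\'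
        simp [pvStartsCmd, pvCmds, PySem.Chars.startswith, List.isPrefixOf]
      | j + 1 => exact absurd (by simp) hj1
    · rw [if_neg hp]
      by_cases hs : pvStartsCmd (c :: rest) = true
      · simp only [Bool.not_false, Bool.true_and, hs, if_pos, true_iff]
        exact ⟨0, by simp, by simpa using hs⟩
      · simp only [Bool.not_false, Bool.true_and, hs, Bool.false_eq_true, if_false]
        rw [ih h.2]
        constructor
        · rintro ⟨j, hj1, hj2⟩
          exact ⟨j + 1, by simp [hj1]; exact fun hh => hp hh.symm, by simpa using hj2⟩
        · rintro ⟨j, hj1, hj2⟩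
          match j with
          | 0 => simp only [List.drop_zero] at hj2; exact absurd hj2 hs
          | j + 1 =>
            refine ⟨j, ?_, by simpa using hj2⟩
            simp at hj1; exact hj1.2

-- on a single line, B's scan equals A's nested test
theorem pvLine_eq (l : List Char) (h : '\n' ∉ l) :
    pvScan false l = pvCheckLine l := by
  rw [Bool.eq_iff_iff, pvScan_line l h]
  unfold pvCheckLine
  rw [List.any_eq_true]
  constructor
  · rintro ⟨j, hj1, hj2⟩
    rw [pvStartsCmd, List.any_eq_true] at hj2
    rcases hj2 with ⟨cmd, hcmd, hpre⟩
    refine ⟨cmd, hcmd, ?_⟩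
    rw [pvSplitOn_head]
    exact (pvCmd_iff cmd l (pvCmds_ne_nil cmd hcmd)).2
      ⟨j, hj1, by simpa [PySem.Chars.startswith] using hpre⟩
  · rintro ⟨cmd, hcmd, hcond⟩
    rw [pvSplitOn_head] at hcond
    rcases (pvCmd_iff cmd l (pvCmds_ne_nil cmd hcmd)).1 hcond
      with ⟨j, hj1, hj2⟩
    refine ⟨j, hj1, ?_⟩
    rw [pvStartsCmd, List.any_eq_true]
    exact ⟨cmd, hcmd, by simpa [PySem.Chars.startswith] using hj2⟩

-- a command match cannot straddle the newline
theorem pvStartsCmd_append (l r : List Char) (hl : '\n' ∉ l) :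
    pvStartsCmd (l ++ '\n' :: r) = pvStartsCmd l := by
  unfold pvStartsCmd
  rw [Bool.eq_iff_iff, List.any_eq_true, List.any_eq_true]
  constructor <;> rintro ⟨cmd, hcmd, hpre⟩ <;> refine ⟨cmd, hcmd, ?_⟩ <;>
    simpa [PySem.Chars.startswith,
      pvPrefix_append_nl cmd l r (pvCmds_no_nl cmd hcmd) hl] using hpre

-- B's scan splits at the first newline
theorem pvScan_append (l r : List Char) (h : '\n' ∉ l) (b : Bool) :
    pvScan b (l ++ '\n' :: r) = (pvScan b l || pvScan false r) := by
  induction l generalizing b with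
  | nil => simp [pvScan]
  | cons c rest ih =>
    simp at h
    have hstarts : pvStartsCmd (c :: (rest ++ '\n' :: r)) = pvStartsCmd (c :: rest) := by
      have := pvStartsCmd_append (c :: rest) r (by simp [h])
      rwa [List.cons_append] at this
    simp only [List.cons_append, pvScan,
      if_neg (show ¬ c = '\n' from fun hh => h.1 hh.symm), hstarts]
    by_cases hp : c = '%'
    · simp only [if_pos hp]
      exact ih h.2 true
    · simp only [if_neg hp]
      by_cases hs : (!b && pvStartsCmd (c :: rest)) = true
      · simp [hs]
      · simp only [hs, Bool.false_eq_true, if_false]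
        exact ih h.2 b

-- the whole-string equivalence, by induction on the number of lines
theorem pvMain (cs : List Char) :
    pvScan false cs = (pvSplitNL cs [] []).any pvCheckLine := by
  induction hn : cs.length using Nat.strong_induction_on generalizing cs with
  | _ n ih =>
    by_cases hmem : '\n' ∈ cs
    · have hsplit := List.takeWhile_append_dropWhile (p := fun c => !(c = '\n' : Bool)) (l := cs)
      cases hdrop : cs.dropWhile (fun c => !(c = '\n' : Bool)) with
      | nil =>
        exfalso
        rw [hdrop, List.append_nil] at hsplit
        rw [← hsplit] at hmem
        have := List.mem_takeWhile_imp hmem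
        simp at this
      | cons x t =>
        have hx : x = '\n' := by
          have hne : cs.dropWhile (fun c => !(c = '\n' : Bool)) ≠ [] := by simp [hdrop]
          have h2 := List.head_dropWhile_not (fun c => !(c = '\n' : Bool)) hne
          simp only [hdrop, List.head_cons] at h2
          simpa using h2
        subst hx
        have hlnl : '\n' ∉ cs.takeWhile (fun c => !(c = '\n' : Bool)) := by
          intro hcon
          have := List.mem_takeWhile_imp hcon
          simp at this
        have hcs : cs = cs.takeWhile (fun c => !(c = '\n' : Bool)) ++ '\n' :: t := by
          conv_lhs => rw [← hsplit, hdrop]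
        have hlen : t.length < n := by
          have hl2 : cs.length = (cs.takeWhile (fun c => !(c = '\n' : Bool))).length + 1 + t.length := by
            conv_lhs => rw [hcs]
            simp [List.length_append]
            omega
          omega
        rw [hcs, pvScan_append _ t hlnl false, pvSplitNL_cons _ t [] hlnl,
            List.any_cons, pvLine_eq _ hlnl, ih t.length hlen t rfl]
        simp
    · rw [pvSplitNL_no_nl cs [] hmem, pvLine_eq cs hmem]
      simp

-- ===== VERDICT (by name: the statement is the Claim_ definition above) =====
theorem contains_document_class_py_spec : Claim_equal_contains_document_class_py := by
  intro preamble _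
  unfold Spec_contains_document_class_py contains_document_class_py contains_document_class_py_alt
  unfold PySem.Chars.splitOn
  rw [pvGo_eq_splitNL _ _ _ _ (by omega), pvMain]
  rfl
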